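-- pv_equiv track=rewrite | github.com/kimsol1134/data_science_notes | my_python_project/data_science_notes/jumto.py | getMinForce
-- ===== SOURCE A (Python) =====
-- import heapq
--
-- def getMinForce(weights) :
--     '''
--     n개의 점토를 하나로 합치기 위해 필요한 힘의 합의 최솟값을 반환하는 함수를 작성하세요.
--     '''
--     # 1. 힙으로 바꾼다.
--     # 2. 가장 작은거 2개 빼서 더한다
--     # 3. 다시 힙에 넣는다.
--     # 4. 반복
--     result = []
--     heapq.heapify(weights)
--     while len(weights) != 1:
--         a1 = heapq.heappop(weights)
--         a2 = heapq.heappop(weights)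
--         a3 = a1 + a2
--         result.append(a3)
--         heapq.heappush(weights, a3)
--
--
--
--     return sum(result)
-- ===== SOURCE B (Python) =====
-- def getMinForce(weights):
--     '''
--     Two-queue (Van Leeuwen) Huffman: sort the weights once, then sweep the
--     sorted leaf queue and a FIFO queue of merged sums, always taking the two
--     smallest fronts.  Returns the total of all merge costs.
--     Note: unlike the original, this does not mutate `weights` in place.
--     '''
--     leaves = sorted(weights)
--     merged = []
--     li = mi = 0
--     total = 0
--
--     def pop_smallest():
--         nonlocal li, mi
--         if mi >= len(merged) or (li < len(leaves) and leaves[li] <= merged[mi]):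
--             v = leaves[li]
--             li += 1
--         else:
--             v = merged[mi]
--             mi += 1
--         return v
--
--     while (len(leaves) - li) + (len(merged) - mi) > 1:
--         s = pop_smallest() + pop_smallest()
--         merged.append(s)
--         total += s
--     return total
-- ===== Notes on version B (the rewrite author's own statement) =====
-- stated objective: faster
-- what changed: Replaced the binary heap with repeated heappop/heappush by the two-queue (Van Leeuwen) Huffman method: sort the weights once, then a linear two-FIFO sweep (sorted leaves, merged sums) always taking the two smallest fronts; B also does not mutate the input list.
import Mathlib
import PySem

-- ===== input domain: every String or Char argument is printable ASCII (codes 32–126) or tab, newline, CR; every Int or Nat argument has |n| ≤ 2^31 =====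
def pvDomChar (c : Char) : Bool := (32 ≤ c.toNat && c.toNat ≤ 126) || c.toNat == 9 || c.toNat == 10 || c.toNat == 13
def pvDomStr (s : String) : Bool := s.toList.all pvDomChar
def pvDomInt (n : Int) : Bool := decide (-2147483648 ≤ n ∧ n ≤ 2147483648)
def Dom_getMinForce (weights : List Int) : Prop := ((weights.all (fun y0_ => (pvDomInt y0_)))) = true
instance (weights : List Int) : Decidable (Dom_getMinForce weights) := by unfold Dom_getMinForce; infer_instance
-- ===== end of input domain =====

-- B replaces A's binary heap by the two-queue (Van Leeuwen) Huffman sweep over the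
-- once-sorted weights; return values agree, but B does not mutate `weights` in place
-- (A leaves it heapified/reduced) — the equivalence proved here is about the return value only.

-- ===== PORT A =====
-- A's heap is modelled at the value level: heappop returns the minimum element
-- (PySem.List.min?) and removes it; heappush adds the element.  The returned
-- value of A depends only on the multiset held by the heap, which this models exactly.
def aPop (h : List Int) : Option (Int × List Int) :=
  match PySem.List.min? h (fun x => x) with
  | none => none               -- heappop from an empty heap: IndexError
  | some m => some (m, h.erase m)

theorem aPop_length {h : List Int} {a : Int} {h' : List Int}
    (e : aPop h = some (a, h')) : h'.length + 1 = h.length := by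
  unfold aPop at e
  split at e
  · exact absurd e (by simp)
  · rename_i m em
    injection e with e'
    injection e' with ea eh
    subst ea; subst eh
    have hmem : m ∈ h := PySem.List.min?_mem em
    have h1 := List.length_erase_of_mem hmem
    have h2 : 0 < h.length := List.length_pos_of_mem hmem
    omega

def aLoop (h : List Int) (res : List Int) : List Int :=
  if h.length = 1 then res
  else
    match e1 : aPop h with
    | none => res              -- Python raises IndexError here; Pre_ excludes it
    | some (a1, h1) =>
      match e2 : aPop h1 with
      | none => res
      | some (a2, h2) => aLoop ((a1 + a2) :: h2) (res ++ [a1 + a2])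
termination_by h.length
decreasing_by
  have t1 := aPop_length e1
  have t2 := aPop_length e2
  simp only [List.length_cons]
  omega

def getMinForce (weights : List Int) : Int := (aLoop weights []).sum

-- ===== PORT B =====
-- pop_smallest(): compare the fronts of the leaf queue and the merged-sum queue.
def bPop (l m : List Int) : Int × List Int × List Int :=
  match l, m with
  | x :: xs, y :: ys => if x ≤ y then (x, xs, y :: ys) else (y, x :: xs, ys)
  | x :: xs, [] => (x, xs, [])
  | [], y :: ys => (y, [], ys)
  | [], [] => (0, [], [])      -- unreachable: the loop guard keeps a queue nonempty

theorem bPop_length {l m : List Int} {a : Int} {l' m' : List Int}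
    (hne : 0 < l.length + m.length) (e : bPop l m = (a, l', m')) :
    l'.length + m'.length + 1 = l.length + m.length := by
  rcases l with _ | ⟨x, xs⟩ <;> rcases m with _ | ⟨y, ys⟩
  · simp at hne
  · simp only [bPop, Prod.mk.injEq] at e; obtain ⟨rfl, rfl, rfl⟩ := e; simp
  · simp only [bPop, Prod.mk.injEq] at e; obtain ⟨rfl, rfl, rfl⟩ := e; simp
  · simp only [bPop] at e
    split at e <;> (simp only [Prod.mk.injEq] at e; obtain ⟨rfl, rfl, rfl⟩ := e; simp; omega)

def bLoop (l m : List Int) (total : Int) : Int :=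
  if 1 < l.length + m.length then
    match e1 : bPop l m with
    | (a, l1, m1) =>
      match e2 : bPop l1 m1 with
      | (b, l2, m2) => bLoop l2 (m2 ++ [a + b]) (total + (a + b))
  else total
termination_by l.length + m.length
decreasing_by
  rename_i hgt
  have t1 := bPop_length (by omega) e1
  have t2 := bPop_length (l := l1) (m := m1) (by omega) e2
  simp only [List.length_append, List.length_cons, List.length_nil]
  omega

def getMinForce_alt (weights : List Int) : Int :=
  bLoop (PySem.List.sorted weights (fun x => x) false) [] 0

-- ===== PRECONDITION & SPEC =====
-- Pre_ excludes only the empty list, on which A raises IndexError (heappop from an empty heap).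
def Pre_getMinForce (weights : List Int) : Prop := weights ≠ []
instance (weights : List Int) : Decidable (Pre_getMinForce weights) := by unfold Pre_getMinForce; infer_instance
def pvWitness_getMinForce : List Int := [3, 1, 2]

def Spec_getMinForce (weights : List Int) (out : Int) : Prop := out = getMinForce_alt weights
instance (weights : List Int) (out : Int) : Decidable (Spec_getMinForce weights out) := by unfold Spec_getMinForce; infer_instance

-- ===== CLAIM (what is proved, stated in full; the proofs are below) =====
def Claim_equal_getMinForce : Prop := ∀ (weights : List Int), Dom_getMinForce weights → Pre_getMinForce weights → Spec_getMinForce weights (getMinForce weights)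

-- ===== LEMMAS AND PROOFS =====

-- The two-queue invariant: every merged sum y splits as p + q (p ≤ q) with q below
-- everything still in the leaf queue, and, for sums behind the front, below the front too.
def QInv (l m : List Int) : Prop :=
  (∀ y ∈ m, ∃ p q : Int, y = p + q ∧ p ≤ q ∧ ∀ z ∈ l, q ≤ z) ∧
  (∀ hd tl, m = hd :: tl → ∀ y ∈ tl, ∃ p q : Int, y = p + q ∧ p ≤ q ∧ (∀ z ∈ l, q ≤ z) ∧ q ≤ hd)

theorem bPop_spec {l m : List Int} {a : Int} {l' m' : List Int}
    (hl : l.Pairwise (· ≤ ·)) (hm : m.Pairwise (· ≤ ·))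
    (hne : 0 < l.length + m.length) (e : bPop l m = (a, l', m')) :
    (∀ z ∈ l ++ m, a ≤ z) ∧ (l ++ m).erase a = l' ++ m' ∧ a ∈ l ++ m ∧
    ((∃ xs, l = a :: xs ∧ l' = xs ∧ m' = m) ∨ (∃ ys, m = a :: ys ∧ l' = l ∧ m' = ys)) := by
  rcases l with _ | ⟨x, xs⟩ <;> rcases m with _ | ⟨y, ys⟩
  · simp at hne
  · -- l = [], m = y :: ys
    simp only [bPop, Prod.mk.injEq] at e; obtain ⟨rfl, rfl, rfl⟩ := e
    refine ⟨?_, by simp, by simp, Or.inr ⟨ys, rfl, rfl, rfl⟩⟩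
    intro z hz; simp at hz
    rcases hz with rfl | hz
    · exact le_refl _
    · exact (List.pairwise_cons.mp hm).1 z hz
  · -- l = x :: xs, m = []
    simp only [bPop, Prod.mk.injEq] at e; obtain ⟨rfl, rfl, rfl⟩ := e
    refine ⟨?_, by simp, by simp, Or.inl ⟨xs, rfl, rfl, rfl⟩⟩
    intro z hz; simp at hz
    rcases hz with rfl | hz
    · exact le_refl _
    · exact (List.pairwise_cons.mp hl).1 z hz
  · -- both nonempty
    simp only [bPop] at e
    split at e <;> rename_i hxy <;> (simp only [Prod.mk.injEq] at e; obtain ⟨rfl, rfl, rfl⟩ := e)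
    · refine ⟨?_, by simp, by simp, Or.inl ⟨xs, rfl, rfl, rfl⟩⟩
      intro z hz; simp at hz
      rcases hz with rfl | hz | rfl | hz
      · exact le_refl _
      · exact (List.pairwise_cons.mp hl).1 z hz
      · exact hxy
      · exact le_trans hxy ((List.pairwise_cons.mp hm).1 z hz)
    · have hyx : y < x := lt_of_not_ge hxy
      have hnotin : y ∉ x :: xs := by
        intro hmem
        rcases List.mem_cons.mp hmem with rfl | hmem
        · exact absurd rfl (ne_of_lt hyx)
        · exact absurd rfl (ne_of_lt (lt_of_lt_of_le hyx ((List.pairwise_cons.mp hl).1 _ hmem)))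
      refine ⟨?_, ?_, by simp, Or.inr ⟨ys, rfl, rfl, rfl⟩⟩
      · intro z hz; simp at hz
        rcases hz with rfl | hz | rfl | hz
        · exact le_of_lt hyx
        · exact le_trans (le_of_lt hyx) ((List.pairwise_cons.mp hl).1 z hz)
        · exact le_refl _
        · exact (List.pairwise_cons.mp hm).1 z hz
      · rw [List.erase_append_right _ hnotin]
        simp

theorem QInv_pop {l m l' m' : List Int} {a : Int}
    (hm : m.Pairwise (· ≤ ·)) (hq : QInv l m)
    (hdj : (∃ xs, l = a :: xs ∧ l' = xs ∧ m' = m) ∨ (∃ ys, m = a :: ys ∧ l' = l ∧ m' = ys)) :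
    QInv l' m' := by
  obtain ⟨c1, c2⟩ := hq
  rcases hdj with ⟨xs, e1, e2, e3⟩ | ⟨ys, e1, e2, e3⟩ <;> (subst e1; replace e2 := e2.symm; subst e2; replace e3 := e3.symm; subst e3)
  · constructor
    · intro y hy
      obtain ⟨p, q, h1, h2, h3⟩ := c1 y hy
      exact ⟨p, q, h1, h2, fun z hz => h3 z (List.mem_cons_of_mem _ hz)⟩
    · intro hd tl hmeq y hy
      obtain ⟨p, q, h1, h2, h3, h4⟩ := c2 hd tl hmeq y hy
      exact ⟨p, q, h1, h2, fun z hz => h3 z (List.mem_cons_of_mem _ hz), h4⟩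
  · constructor
    · intro y hy
      obtain ⟨p, q, h1, h2, h3, _⟩ := c2 a ys rfl y hy
      exact ⟨p, q, h1, h2, h3⟩
    · intro hd tl heq y hy
      subst heq
      obtain ⟨p, q, h1, h2, h3, h4⟩ := c2 a (hd :: tl) rfl y (List.mem_cons_of_mem _ hy)
      refine ⟨p, q, h1, h2, h3, le_trans h4 ?_⟩
      exact (List.pairwise_cons.mp hm).1 hd (by simp)

-- every merged sum surviving both pops is at most the new sum a + b
theorem m2_le_s {l m l1 m1 l2 m2 : List Int} {a b : Int}
    (hm : m.Pairwise (· ≤ ·)) (hq : QInv l m)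
    (d1 : (∃ xs, l = a :: xs ∧ l1 = xs ∧ m1 = m) ∨ (∃ ys, m = a :: ys ∧ l1 = l ∧ m1 = ys))
    (d2 : (∃ xs, l1 = b :: xs ∧ l2 = xs ∧ m2 = m1) ∨ (∃ ys, m1 = b :: ys ∧ l2 = l1 ∧ m2 = ys)) :
    ∀ y ∈ m2, y ≤ a + b := by
  obtain ⟨c1, c2⟩ := hq
  intro y hy
  rcases d1 with ⟨xs, e1, e2, e3⟩ | ⟨ys, e1, e2, e3⟩ <;>
    (replace e2 := e2.symm; subst e2; replace e3 := e3.symm; subst e3)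
  · subst e1
    rcases d2 with ⟨xs', f1, f2, f3⟩ | ⟨ys', f1, f2, f3⟩ <;>
      (replace f2 := f2.symm; subst f2; replace f3 := f3.symm; subst f3) <;> subst f1
    · obtain ⟨p, q, rfl, h2, h3⟩ := c1 y hy
      have ha := h3 a (by simp)
      have hb := h3 b (by simp)
      omega
    · obtain ⟨p, q, rfl, h2, h3, h4⟩ := c2 b ys' rfl y hy
      have ha := h3 a (by simp)
      omega
  · subst e1
    rcases d2 with ⟨xs', f1, f2, f3⟩ | ⟨ys', f1, f2, f3⟩ <;>
      (replace f2 := f2.symm; subst f2; replace f3 := f3.symm; subst f3) <;> subst f1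
    · obtain ⟨p, q, rfl, h2, h3, h4⟩ := c2 a ys rfl y hy
      have hb := h3 b (by simp)
      omega
    · obtain ⟨p, q, rfl, h2, h3, h4⟩ := c2 a (b :: ys') rfl y (List.mem_cons_of_mem _ hy)
      have hab : a ≤ b := (List.pairwise_cons.mp hm).1 b (by simp)
      omega

theorem QInv_push {l m l1 m1 l2 m2 : List Int} {a b : Int}
    (hm : m.Pairwise (· ≤ ·)) (hq : QInv l m)
    (d1 : (∃ xs, l = a :: xs ∧ l1 = xs ∧ m1 = m) ∨ (∃ ys, m = a :: ys ∧ l1 = l ∧ m1 = ys))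
    (d2 : (∃ xs, l1 = b :: xs ∧ l2 = xs ∧ m2 = m1) ∨ (∃ ys, m1 = b :: ys ∧ l2 = l1 ∧ m2 = ys))
    (hab : a ≤ b) (hbmin : ∀ z ∈ l1 ++ m1, b ≤ z) :
    QInv l2 (m2 ++ [a + b]) := by
  obtain ⟨c1, c2⟩ := hq
  rcases d1 with ⟨xs, e1, e2, e3⟩ | ⟨ys, e1, e2, e3⟩ <;>
    (replace e2 := e2.symm; subst e2; replace e3 := e3.symm; subst e3) <;> subst e1 <;>
    (rcases d2 with ⟨xs', f1, f2, f3⟩ | ⟨ys', f1, f2, f3⟩ <;>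
      (replace f2 := f2.symm; subst f2; replace f3 := f3.symm; subst f3) <;> subst f1)
  · -- both pops from the leaf queue: l = a::b::xs', merged queue m untouched
    constructor
    · intro y hy
      rcases List.mem_append.mp hy with hy | hy
      · obtain ⟨p, q, h1, h2, h3⟩ := c1 y hy
        exact ⟨p, q, h1, h2, fun z hz => h3 z (by simp [hz])⟩
      · simp at hy; subst hy
        exact ⟨a, b, rfl, hab, fun z hz => hbmin z (by simp [hz])⟩
    · rcases m with _ | ⟨w, ws⟩
      · intro hd tl heq y hy
        simp at heq
        obtain ⟨rfl, rfl⟩ := heq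
        simp at hy
      · intro hd tl heq y hy
        injection heq with g1 g2
        subst g1; subst g2
        rcases List.mem_append.mp hy with hy | hy
        · obtain ⟨p, q, h1, h2, h3, h4⟩ := c2 w ws rfl y hy
          exact ⟨p, q, h1, h2, fun z hz => h3 z (by simp [hz]), h4⟩
        · simp at hy; subst hy
          exact ⟨a, b, rfl, hab, fun z hz => hbmin z (by simp [hz]), hbmin w (by simp)⟩
  · -- first pop from leaves, second from merged: l = a::xs, m = b::ys'
    constructor
    · intro y hy
      rcases List.mem_append.mp hy with hy | hy
      · obtain ⟨p, q, h1, h2, h3, _⟩ := c2 b ys' rfl y hy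
        exact ⟨p, q, h1, h2, fun z hz => h3 z (by simp [hz])⟩
      · simp at hy; subst hy
        exact ⟨a, b, rfl, hab, fun z hz => hbmin z (by simp [hz])⟩
    · rcases ys' with _ | ⟨w, ws⟩
      · intro hd tl heq y hy
        simp at heq
        obtain ⟨rfl, rfl⟩ := heq
        simp at hy
      · intro hd tl heq y hy
        injection heq with g1 g2
        subst g1; subst g2
        have hbw : b ≤ w := (List.pairwise_cons.mp hm).1 w (by simp)
        rcases List.mem_append.mp hy with hy | hy
        · obtain ⟨p, q, h1, h2, h3, h4⟩ := c2 b (w :: ws) rfl y (List.mem_cons_of_mem _ hy)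
          exact ⟨p, q, h1, h2, fun z hz => h3 z (by simp [hz]), le_trans h4 hbw⟩
        · simp at hy; subst hy
          exact ⟨a, b, rfl, hab, fun z hz => hbmin z (by simp [hz]), hbmin w (by simp)⟩
  · -- first pop from merged, second from leaves: m = a::ys, l = b::xs'
    constructor
    · intro y hy
      rcases List.mem_append.mp hy with hy | hy
      · obtain ⟨p, q, h1, h2, h3, _⟩ := c2 a ys rfl y hy
        exact ⟨p, q, h1, h2, fun z hz => h3 z (by simp [hz])⟩
      · simp at hy; subst hy
        exact ⟨a, b, rfl, hab, fun z hz => hbmin z (by simp [hz])⟩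
    · rcases ys with _ | ⟨w, ws⟩
      · intro hd tl heq y hy
        simp at heq
        obtain ⟨rfl, rfl⟩ := heq
        simp at hy
      · intro hd tl heq y hy
        injection heq with g1 g2
        subst g1; subst g2
        have haw : a ≤ w := (List.pairwise_cons.mp hm).1 w (by simp)
        rcases List.mem_append.mp hy with hy | hy
        · obtain ⟨p, q, h1, h2, h3, h4⟩ := c2 a (w :: ws) rfl y (List.mem_cons_of_mem _ hy)
          exact ⟨p, q, h1, h2, fun z hz => h3 z (by simp [hz]), le_trans h4 haw⟩
        · simp at hy; subst hy
          exact ⟨a, b, rfl, hab, fun z hz => hbmin z (by simp [hz]), hbmin w (by simp)⟩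
  · -- both pops from merged: m = a::b::ys'
    constructor
    · intro y hy
      rcases List.mem_append.mp hy with hy | hy
      · obtain ⟨p, q, h1, h2, h3, _⟩ := c2 a (b :: ys') rfl y (List.mem_cons_of_mem _ hy)
        exact ⟨p, q, h1, h2, h3⟩
      · simp at hy; subst hy
        exact ⟨a, b, rfl, hab, fun z hz => hbmin z (by simp [hz])⟩
    · rcases ys' with _ | ⟨w, ws⟩
      · intro hd tl heq y hy
        simp at heq
        obtain ⟨rfl, rfl⟩ := heq
        simp at hy
      · intro hd tl heq y hy
        injection heq with g1 g2
        subst g1; subst g2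
        have haw : a ≤ w := (List.pairwise_cons.mp hm).1 w (by simp)
        rcases List.mem_append.mp hy with hy | hy
        · obtain ⟨p, q, h1, h2, h3, h4⟩ := c2 a (b :: w :: ws) rfl y (by simp [hy])
          exact ⟨p, q, h1, h2, h3, le_trans h4 haw⟩
        · simp at hy; subst hy
          exact ⟨a, b, rfl, hab, fun z hz => hbmin z (by simp [hz]), hbmin w (by simp)⟩

theorem aPop_spec {h : List Int} (hne : h ≠ []) :
    ∃ a h', aPop h = some (a, h') ∧ a ∈ h ∧ (∀ z ∈ h, a ≤ z) ∧ h' = h.erase a := by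
  cases emin : PySem.List.min? h (fun x => x) with
  | none => exact absurd ((PySem.List.min?_eq_none_iff _ _).mp emin) hne
  | some v =>
    refine ⟨v, h.erase v, by simp [aPop, emin], PySem.List.min?_mem emin, ?_, rfl⟩
    intro z hz
    simpa using PySem.List.min?_isMin emin z hz

theorem aLoop_one {h res : List Int} (h1 : h.length = 1) : aLoop h res = res := by
  rw [aLoop, if_pos h1]

theorem aLoop_step {h h1 h2 res : List Int} {a1 a2 : Int} (hne : h.length ≠ 1)
    (e1 : aPop h = some (a1, h1)) (e2 : aPop h1 = some (a2, h2)) :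
    aLoop h res = aLoop ((a1 + a2) :: h2) (res ++ [a1 + a2]) := by
  rw [aLoop, if_neg hne]
  split
  · rename_i heq; rw [heq] at e1; exact absurd e1 (by simp)
  · rename_i a1' h1' heq
    rw [e1] at heq
    injection heq with heq
    injection heq with g1 g2
    subst g1; subst g2
    split
    · rename_i heq2; rw [heq2] at e2; exact absurd e2 (by simp)
    · rename_i a2' h2' heq2
      rw [e2] at heq2
      injection heq2 with heq2
      injection heq2 with g1 g2
      subst g1; subst g2
      rfl

theorem bLoop_stop {l m : List Int} {t : Int} (hle : ¬ 1 < l.length + m.length) :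
    bLoop l m t = t := by
  rw [bLoop, if_neg hle]

theorem bLoop_step {l m l1 m1 l2 m2 : List Int} {a b : Int}
    (hgt : 1 < l.length + m.length) (e1 : bPop l m = (a, l1, m1))
    (e2 : bPop l1 m1 = (b, l2, m2)) (t : Int) :
    bLoop l m t = bLoop l2 (m2 ++ [a + b]) (t + (a + b)) := by
  rw [bLoop, if_pos hgt]
  split
  rename_i a' l1' m1' heq
  rw [e1] at heq
  injection heq with g1 heq
  injection heq with g2 g3
  subst g1; subst g2; subst g3
  split
  rename_i b' l2' m2' heq2
  rw [e2] at heq2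
  injection heq2 with g1 heq2
  injection heq2 with g2 g3
  subst g1; subst g2; subst g3
  rfl

theorem bLoop_acc (l0 m0 : List Int) (t0 : Int) : ∀ t : Int, bLoop l0 m0 t = t + bLoop l0 m0 0 := by
  induction l0, m0, t0 using bLoop.induct with
  | case1 l m total hgt a l1 m1 e1 b l2 m2 e2 ih =>
    intro t
    rw [bLoop_step hgt e1 e2 t, bLoop_step hgt e1 e2 0, ih (t + (a + b)), ih (0 + (a + b))]
    ring
  | case2 l m total hgt =>
    intro t
    rw [bLoop_stop hgt, bLoop_stop hgt]
    ring

theorem pairwise_of_pop {l m l' m' : List Int} {a : Int}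
    (hl : l.Pairwise (· ≤ ·)) (hm : m.Pairwise (· ≤ ·))
    (hdj : (∃ xs, l = a :: xs ∧ l' = xs ∧ m' = m) ∨ (∃ ys, m = a :: ys ∧ l' = l ∧ m' = ys)) :
    l'.Pairwise (· ≤ ·) ∧ m'.Pairwise (· ≤ ·) := by
  rcases hdj with ⟨xs, e1, e2, e3⟩ | ⟨ys, e1, e2, e3⟩ <;> (subst e1; subst e2; subst e3)
  · exact ⟨(List.pairwise_cons.mp hl).2, hm⟩
  · exact ⟨hl, (List.pairwise_cons.mp hm).2⟩

theorem main_lemma (n : ℕ) : ∀ (h l m res : List Int), h.length = n →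
    h.Perm (l ++ m) → l.Pairwise (· ≤ ·) → m.Pairwise (· ≤ ·) → QInv l m →
    (aLoop h res).sum = res.sum + bLoop l m 0 := by
  induction n using Nat.strong_induction_on with
  | _ n ih =>
  intro h l m res hlen hperm hl hm hq
  have hlensum : l.length + m.length = h.length := by
    have := hperm.length_eq; simp at this; omega
  by_cases hn1 : h.length = 1
  · rw [aLoop_one hn1, bLoop_stop (by omega)]
    simp
  by_cases hn0 : h = []
  · subst hn0
    rw [bLoop_stop (by simp only [List.length_nil] at hlensum; omega)]
    rw [aLoop, if_neg hn1]
    simp [aPop, PySem.List.min?]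
  -- the interesting case: at least two elements
  have hlen2 : 2 ≤ h.length := by
    have : h.length ≠ 0 := by simpa [List.length_eq_zero_iff] using hn0
    omega
  -- A pops its two minima
  obtain ⟨a1, h1, e1, ha1mem, ha1min, hh1⟩ := aPop_spec hn0
  -- B pops the two fronts
  rcases eb1 : bPop l m with ⟨a, l1, m1⟩
  obtain ⟨hamin, herase1, hamem, hdj1⟩ := bPop_spec hl hm (by omega) eb1
  obtain ⟨hl1, hm1⟩ := pairwise_of_pop hl hm hdj1
  have hq1 : QInv l1 m1 := QInv_pop hm hq hdj1
  -- the popped values agree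
  have haa : a1 = a := by
    have h1le : a1 ≤ a := ha1min a (hperm.mem_iff.mpr hamem)
    have h2le : a ≤ a1 := hamin a1 (hperm.mem_iff.mp ha1mem)
    omega
  subst haa
  have hperm1 : h1.Perm (l1 ++ m1) := by
    rw [hh1, ← herase1]
    exact hperm.erase a1
  have hlen1 : h1.length = h.length - 1 := by
    have := aPop_length e1; omega
  -- second pop
  have hn10 : h1 ≠ [] := by
    intro hc; rw [hc] at hlen1; simp at hlen1; omega
  obtain ⟨a2, h2, e2, ha2mem, ha2min, hh2⟩ := aPop_spec hn10
  have hlensum1 : l1.length + m1.length = h1.length := by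
    have := hperm1.length_eq; simp at this; omega
  rcases eb2 : bPop l1 m1 with ⟨b, l2, m2⟩
  obtain ⟨hbmin, herase2, hbmem, hdj2⟩ := bPop_spec hl1 hm1 (by omega) eb2
  obtain ⟨hl2, hm2⟩ := pairwise_of_pop hl1 hm1 hdj2
  have hbb : a2 = b := by
    have h1le : a2 ≤ b := ha2min b (hperm1.mem_iff.mpr hbmem)
    have h2le : b ≤ a2 := hbmin a2 (hperm1.mem_iff.mp ha2mem)
    omega
  subst hbb
  have hperm2 : h2.Perm (l2 ++ m2) := by
    rw [hh2, ← herase2]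
    exact hperm1.erase a2
  have hab : a1 ≤ a2 := hamin a2 (List.mem_of_mem_erase (herase1 ▸ hbmem))
  have hsort2 : (m2 ++ [a1 + a2]).Pairwise (· ≤ ·) := by
    apply List.pairwise_append.mpr
    refine ⟨hm2, List.pairwise_singleton _ _, ?_⟩
    intro y hy z hz
    simp at hz; subst hz
    exact m2_le_s hm hq hdj1 hdj2 y hy
  have hq2 : QInv l2 (m2 ++ [a1 + a2]) := QInv_push hm hq hdj1 hdj2 hab hbmin
  have hpermN : ((a1 + a2) :: h2).Perm (l2 ++ (m2 ++ [a1 + a2])) := by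
    have p1 : ((a1 + a2) :: h2).Perm ((a1 + a2) :: (l2 ++ m2)) := hperm2.cons _
    have p2 : ((a1 + a2) :: (l2 ++ m2)).Perm ((l2 ++ m2) ++ [a1 + a2]) :=
      (List.perm_append_singleton _ _).symm
    exact (p1.trans p2).trans (List.Perm.of_eq (List.append_assoc _ _ _))
  have hlh2 : h2.length + 1 = h1.length := aPop_length e2
  have hkey := ih ((a1 + a2) :: h2).length (by simp; omega) ((a1 + a2) :: h2) l2
    (m2 ++ [a1 + a2]) (res ++ [a1 + a2]) rfl hpermN hl2 hsort2 hq2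
  rw [aLoop_step hn1 e1 e2, hkey, bLoop_step (by omega) eb1 eb2 0,
      bLoop_acc l2 (m2 ++ [a1 + a2]) 0 (0 + (a1 + a2))]
  simp [List.sum_append]
  ring
-- ===== VERDICT (by name: the statement is the Claim_ definition above) =====
theorem getMinForce_spec : Claim_equal_getMinForce := by
  intro w _ _
  unfold Spec_getMinForce getMinForce getMinForce_alt
  have hperm : w.Perm (PySem.List.sorted w (fun x => x) false ++ []) := by
    simpa using (PySem.List.sorted_perm (xs := w) (key := fun x => x) (rev := false)).symm
  have hpw : (PySem.List.sorted w (fun x => x) false).Pairwise (· ≤ ·) := by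
    simpa using PySem.List.sorted_pairwise (xs := w) (key := fun x => x)
  have := main_lemma w.length w (PySem.List.sorted w (fun x => x) false) [] [] rfl hperm hpw
    (by simp) ⟨by simp, by simp⟩
  simpa using this
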